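-- pv_equiv track=rewrite | github.com/dennisjlee/adventofcode | aoc2023/day13.py | find_horizontal_reflection
-- ===== SOURCE A (Python) =====
-- def find_horizontal_reflection(grid: list[list[str]], error_goal=0) -> int | None:
--     height = len(grid)
--     width = len(grid[0])
--
--     for y in range(height - 1):
--         errors = 0
--         for dy in range(min(y + 1, height - y - 1)):
--             errors += sum(1 for x in range(width) if grid[y - dy][x] != grid[y + dy + 1][x])
--             if errors > error_goal:
--                 break
--
--         if errors == error_goal:
--             return y
--
--     return None
-- ===== SOURCE B (Python) =====
-- def find_horizontal_reflection(grid: list[list[str]], error_goal=0) -> int | None: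
--     width = len(grid[0])
--
--     def row_diff(a, b):
--         return sum(a[x] != b[x] for x in range(width))
--
--     above = []
--     rest = grid
--     y = 0
--     while len(rest) > 1:
--         above = [rest[0]] + above
--         rest = rest[1:]
--         if sum(row_diff(a, b) for a, b in zip(above, rest)) == error_goal:
--             return y
--         y += 1
--     return None
-- ===== Notes on version B (the rewrite author's own statement) =====
-- stated objective: simpler
-- what changed: B replaces A's dy/index arithmetic and early-break inner loop by maintaining the reversed prefix of rows and zipping it with the suffix, comparing the full mirror-mismatch total to the goal (counts only grow, so the break never changes the answer).
-- outside the precondition, e.g. on find_horizontal_reflection([['a'], ['a'], []], 0): A returns 0, B returns 0; on find_horizontal_reflection([['a'], []], 0): A raises IndexError, B raises IndexError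
import Mathlib
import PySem

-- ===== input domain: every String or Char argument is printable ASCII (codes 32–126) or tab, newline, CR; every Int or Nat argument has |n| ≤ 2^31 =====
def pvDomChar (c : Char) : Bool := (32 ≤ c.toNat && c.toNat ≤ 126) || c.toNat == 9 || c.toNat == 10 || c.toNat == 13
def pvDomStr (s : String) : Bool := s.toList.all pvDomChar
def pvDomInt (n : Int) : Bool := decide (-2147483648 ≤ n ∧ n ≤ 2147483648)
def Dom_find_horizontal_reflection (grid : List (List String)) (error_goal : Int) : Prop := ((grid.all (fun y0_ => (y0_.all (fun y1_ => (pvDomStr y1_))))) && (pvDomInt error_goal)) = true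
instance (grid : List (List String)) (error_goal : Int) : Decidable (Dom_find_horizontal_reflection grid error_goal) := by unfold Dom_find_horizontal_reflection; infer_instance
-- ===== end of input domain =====

-- B replaces A's dy/index arithmetic and early-break inner loop by zipping the reversed
-- prefix of rows with the suffix and comparing the full mismatch total to the goal (simpler).

-- ===== PORT A =====
-- sum(1 for x in range(width) if grid[..][x] != grid[..][x])
def pvCmpRowA (a b : List String) (w : Nat) : Int :=
  (List.range w).foldl (fun acc x => if a.getD x "" ≠ b.getD x "" then acc + 1 else acc) 0

-- inner 'for dy' loop with the 'if errors > error_goal: break'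
def pvInnerA (g : List (List String)) (w y : Nat) (goal : Int) : List Nat → Int → Int
  | [], e => e
  | dy :: rest, e =>
    let e' := e + pvCmpRowA (g.getD (y - dy) []) (g.getD (y + dy + 1) []) w
    if e' > goal then e' else pvInnerA g w y goal rest e'

-- outer 'for y in range(height - 1)' loop
def pvOuterA (g : List (List String)) (w : Nat) (goal : Int) : List Nat → Option Int
  | [] => none
  | y :: ys =>
    let e := pvInnerA g w y goal (List.range (min (y + 1) (g.length - y - 1))) 0
    if e = goal then some (y : Int) else pvOuterA g w goal ys

def find_horizontal_reflection (grid : List (List String)) (error_goal : Int) : Option Int :=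
  pvOuterA grid (grid.headD []).length error_goal (List.range (grid.length - 1))

-- ===== PORT B =====
-- sum(a[x] != b[x] for x in range(width))
def pvRowDiffB (a b : List String) (w : Nat) : Int :=
  ((List.range w).countP (fun x => a.getD x "" != b.getD x "") : Nat)

def pvZipSumB (w : Nat) (above rest : List (List String)) : Int :=
  (above.zip rest).foldl (fun acc p => acc + pvRowDiffB p.1 p.2 w) 0

-- the 'while len(rest) > 1' loop carrying (above, rest, y)
def pvLoopB (w : Nat) (goal : Int) : List (List String) → List (List String) → Nat → Option Int
  | _, [], _ => none
  | _, [_], _ => none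
  | above, r :: r2 :: rs, y =>
    let above' := r :: above
    if pvZipSumB w above' (r2 :: rs) = goal then some (y : Int)
    else pvLoopB w goal above' (r2 :: rs) (y + 1)

def find_horizontal_reflection_alt (grid : List (List String)) (error_goal : Int) : Option Int :=
  pvLoopB (grid.headD []).length error_goal [] grid 0

-- ===== PRECONDITION & SPEC =====
-- Pre_ excludes the empty grid (A raises IndexError at grid[0]) and grids containing a row
-- shorter than the first row, on which A raises IndexError whenever such a row is compared.
def Pre_find_horizontal_reflection (grid : List (List String)) (error_goal : Int) : Prop :=
  grid ≠ [] ∧ ∀ row ∈ grid, (grid.headD []).length ≤ row.length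
instance (grid : List (List String)) (error_goal : Int) : Decidable (Pre_find_horizontal_reflection grid error_goal) := by unfold Pre_find_horizontal_reflection; infer_instance

def pvWitness_find_horizontal_reflection : List (List String) × Int :=
  ([["#", "."], ["#", "."], ["#", "x"]], 0)

def Spec_find_horizontal_reflection (grid : List (List String)) (error_goal : Int) (out : Option Int) : Prop := out = find_horizontal_reflection_alt grid error_goal
instance (grid : List (List String)) (error_goal : Int) (out : Option Int) : Decidable (Spec_find_horizontal_reflection grid error_goal out) := by unfold Spec_find_horizontal_reflection; infer_instance

-- ===== CLAIM (what is proved, stated in full; the proofs are below) =====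
def Claim_equal_find_horizontal_reflection : Prop := ∀ (grid : List (List String)) (error_goal : Int), Dom_find_horizontal_reflection grid error_goal → Pre_find_horizontal_reflection grid error_goal → Spec_find_horizontal_reflection grid error_goal (find_horizontal_reflection grid error_goal)

-- ===== LEMMAS AND PROOFS =====

-- A's if-count fold equals B's countP (as Int).
theorem pvCmpRowA_eq (a b : List String) (w : Nat) :
    pvCmpRowA a b w = pvRowDiffB a b w := by
  unfold pvCmpRowA pvRowDiffB
  have h : ∀ (l : List Nat) (acc : Int),
      l.foldl (fun acc x => if a.getD x "" ≠ b.getD x "" then acc + 1 else acc) acc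
        = acc + (l.countP (fun x => a.getD x "" != b.getD x "") : Nat) := by
    intro l
    induction l with
    | nil => intro acc; simp
    | cons x xs ih =>
      intro acc
      rw [List.foldl_cons, ih, List.countP_cons]
      by_cases hx : a.getD x "" = b.getD x ""
      · rw [if_neg (not_not_intro hx), if_neg (by simp only [bne_iff_ne, ne_eq, not_not]; exact hx)]
        norm_num
      · rw [if_pos hx, if_pos (by simp only [bne_iff_ne, ne_eq]; exact hx)]
        push_cast
        ring
  simpa using h (List.range w) 0

theorem pvRowDiffB_nonneg (a b : List String) (w : Nat) : 0 ≤ pvRowDiffB a b w := by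
  unfold pvRowDiffB; exact_mod_cast Int.natCast_nonneg _

theorem pvMapSum_nonneg (g : List (List String)) (w y : Nat) (l : List Nat) :
    0 ≤ ((l.map (fun dy => pvRowDiffB (g.getD (y - dy) []) (g.getD (y + dy + 1) []) w)).sum) := by
  apply List.sum_nonneg
  intro x hx
  simp only [List.mem_map] at hx
  obtain ⟨d, _, hd⟩ := hx
  exact hd ▸ pvRowDiffB_nonneg _ _ _

-- the break in A's inner loop never changes whether the total equals the goal
theorem pvInnerA_eq_goal (g : List (List String)) (w y : Nat) (goal : Int) :
    ∀ (dys : List Nat) (e : Int),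
      (pvInnerA g w y goal dys e = goal ↔
        e + ((dys.map (fun dy => pvRowDiffB (g.getD (y - dy) []) (g.getD (y + dy + 1) []) w)).sum) = goal) := by
  intro dys
  induction dys with
  | nil => intro e; simp [pvInnerA]
  | cons dy rest ih =>
    intro e
    simp only [pvInnerA, pvCmpRowA_eq, List.map_cons, List.sum_cons]
    by_cases hb : e + pvRowDiffB (g.getD (y - dy) []) (g.getD (y + dy + 1) []) w > goal
    · rw [if_pos hb]
      have hs := pvMapSum_nonneg g w y rest
      constructor <;> intro h <;> omega
    · rw [if_neg hb, ih]
      constructor <;> intro h <;> omega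

-- fold-of-add over a list equals the sum of the mapped list
theorem foldl_add_sum (w : Nat) (l : List (List String × List String)) :
    ∀ acc : Int, l.foldl (fun acc p => acc + pvRowDiffB p.1 p.2 w) acc
      = acc + (l.map (fun p => pvRowDiffB p.1 p.2 w)).sum := by
  induction l with
  | nil => intro acc; simp
  | cons p ps ih => intro acc; simp [List.foldl, ih]; ring

-- zip of reversed (y+1)-prefix with (y+1)-suffix = list of A's mirror pairs
theorem zip_reverse_take_drop (g : List (List String)) (n : Nat) (hn : n ≤ g.length) :
    ((g.take n).reverse).zip (g.drop n)
      = (List.range (min n (g.length - n))).map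
          (fun k => (g.getD (n - 1 - k) [], g.getD (n + k) [])) := by
  apply List.ext_getElem
  · simp only [List.length_zip, List.length_reverse, List.length_take, List.length_drop,
      List.length_map, List.length_range]
    omega
  · intro k h1 h2
    have hk : k < min n (g.length - n) := by simpa using h2
    have hk1 : n - 1 - k < g.length := by omega
    have hk2 : n + k < g.length := by omega
    simp only [List.getElem_zip, List.getElem_map, List.getElem_range, List.getElem_reverse,
      List.getElem_take, List.getElem_drop, List.length_take,
      Nat.min_eq_left hn, List.getD_eq_getElem _ _ hk1, List.getD_eq_getElem _ _ hk2]

theorem pvZipSumB_eq (g : List (List String)) (w y : Nat) (hy : y + 1 ≤ g.length) :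
    pvZipSumB w ((g.take (y + 1)).reverse) (g.drop (y + 1))
      = ((List.range (min (y + 1) (g.length - y - 1))).map
          (fun dy => pvRowDiffB (g.getD (y - dy) []) (g.getD (y + dy + 1) []) w)).sum := by
  unfold pvZipSumB
  rw [zip_reverse_take_drop g (y + 1) hy, foldl_add_sum, List.map_map, zero_add,
    (by omega : g.length - y - 1 = g.length - (y + 1))]
  apply congrArg List.sum
  apply List.map_congr_left
  intro k hk
  simp only [Function.comp_apply]
  rw [(by omega : y + 1 - 1 - k = y - k), (by omega : y + 1 + k = y + k + 1)]

-- main loop correspondence: B's structural loop = A's indexed loop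
theorem loop_eq (g : List (List String)) (w : Nat) (goal : Int) :
    ∀ (rest above : List (List String)) (y : Nat),
      above = (g.take y).reverse → rest = g.drop y →
      pvLoopB w goal above rest y = pvOuterA g w goal (List.range' y (g.length - 1 - y)) := by
  intro rest
  induction rest with
  | nil =>
    intro above y ha hr
    have : g.length ≤ y := by
      have := congrArg List.length hr; simp at this; omega
    have h0 : g.length - 1 - y = 0 := by omega
    simp [pvLoopB, h0, pvOuterA]
  | cons r rest' ih =>
    intro above y ha hr
    have hylt : y < g.length := by
      have := congrArg List.length hr; simp at this; omega
    have hcd := List.getElem_cons_drop hylt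
    rw [← hr] at hcd
    have hgy : g[y]'hylt = r := ((List.cons.injEq _ _ _ _).mp hcd).1
    have hdrop : g.drop (y + 1) = rest' := ((List.cons.injEq _ _ _ _).mp hcd).2
    cases rest' with
    | nil =>
      have : g.length = y + 1 := by
        have := congrArg List.length hr; simp at this; omega
      have h0 : g.length - 1 - y = 0 := by omega
      simp [pvLoopB, h0, pvOuterA]
    | cons r2 rs =>
      have hlen : y + 1 < g.length := by
        have := congrArg List.length hr; simp at this; omega
      have hsucc : g.length - 1 - y = (g.length - 1 - (y + 1)) + 1 := by omega
      rw [hsucc, List.range'_succ]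
      have habove' : r :: above = (g.take (y + 1)).reverse := by
        rw [List.take_add_one, List.getElem?_eq_getElem hylt, hgy, ha]
        simp
      have hrest' : r2 :: rs = g.drop (y + 1) := hdrop.symm
      have hzip : pvZipSumB w (r :: above) (r2 :: rs) =
          ((List.range (min (y + 1) (g.length - y - 1))).map
            (fun dy => pvRowDiffB (g.getD (y - dy) []) (g.getD (y + dy + 1) []) w)).sum := by
        rw [habove', hrest']
        exact pvZipSumB_eq g w y (by omega)
      have hinner : (pvInnerA g w y goal (List.range (min (y + 1) (g.length - y - 1))) 0 = goal)
          ↔ (pvZipSumB w (r :: above) (r2 :: rs) = goal) := by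
        rw [hzip, pvInnerA_eq_goal]
        constructor <;> (intro h; omega)
      simp only [pvLoopB, pvOuterA]
      by_cases hg : pvZipSumB w (r :: above) (r2 :: rs) = goal
      · rw [if_pos hg, if_pos (hinner.mpr hg)]
      · rw [if_neg hg, if_neg (fun h => hg (hinner.mp h))]
        exact ih (r :: above) (y + 1) habove' hrest'

-- ===== VERDICT (by name: the statement is the Claim_ definition above) =====
theorem find_horizontal_reflection_spec : Claim_equal_find_horizontal_reflection := by
  intro grid error_goal _ _
  unfold Spec_find_horizontal_reflection find_horizontal_reflection find_horizontal_reflection_alt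
  rw [loop_eq grid (grid.headD []).length error_goal grid [] 0 (by simp) (by simp)]
  rw [List.range_eq_range']
  norm_num
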